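-- pv_equiv track=rewrite | github.com/cement-hools/algoritms | 13 sprint/final/A.data_center.py | photos_in_data_centers
-- ===== SOURCE A (Python) =====
-- def photos_in_data_centers(data_centers):
--     photos = 0
--
--     while len(data_centers) != 1:
--         data_centers.sort(reverse=True)
--
--         if data_centers[-1] == 0:
--             data_centers.pop()
--             continue
--
--         data_centers[0] -= 1
--         data_centers[-1] -= 1
--         photos += 1
--
--     return photos
-- ===== SOURCE B (Python) =====
-- def photos_in_data_centers(data_centers):
--     # closed form: each photo pairs two distinct centers; the answer is the
--     # classic max-matching count min(total//2, total - max).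
--     if len(data_centers) == 1:
--         return 0
--     total = sum(data_centers)
--     return min(total // 2, total - max(data_centers))
-- ===== Notes on version B (the rewrite author's own statement) =====
-- stated objective: faster
-- what changed: Replaces the simulation loop (re-sorting and decrementing max/min until one center remains) by the closed-form answer min(total//2, total - max) computed in one pass.
import Mathlib
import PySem

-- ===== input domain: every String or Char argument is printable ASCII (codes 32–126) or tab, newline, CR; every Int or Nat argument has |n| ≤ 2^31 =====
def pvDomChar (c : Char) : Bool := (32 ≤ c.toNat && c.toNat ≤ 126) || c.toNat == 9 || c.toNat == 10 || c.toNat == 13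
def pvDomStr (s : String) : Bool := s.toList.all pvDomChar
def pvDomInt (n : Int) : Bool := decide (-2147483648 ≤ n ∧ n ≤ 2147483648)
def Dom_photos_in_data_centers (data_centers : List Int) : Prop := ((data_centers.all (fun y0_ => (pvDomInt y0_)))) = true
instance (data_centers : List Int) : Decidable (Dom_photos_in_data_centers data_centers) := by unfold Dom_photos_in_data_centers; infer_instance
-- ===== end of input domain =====

-- B replaces A's simulation loop by the closed form min(total//2, total - max) (faster, O(n));
-- equivalence is about the RETURN value only: the Python A sorts/pops its argument in place, B does not.


-- ===== PORT A =====
-- hand port of the statement 'l[i] = v' (used only with i = 0 and i = -1): exact where the index is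
-- in range; out of range Python raises IndexError (those calls are unreachable under Pre_)
def pySetItem (l : List Int) (i : Int) (v : Int) : List Int :=
  match PySem.List.pyIdx? l.length i with
  | some j => l.set j v
  | none => l

-- fuel bound for A's while-loop: every iteration pops an element or lowers the sum by 2
def pvMeasure (l : List Int) : Nat := (l.map Int.toNat).sum + l.length

def photosLoop (fuel : Nat) (l : List Int) (photos : Int) : Int :=
  match fuel with
  | 0 => photos
  | fuel + 1 =>
    if l.length ≠ 1 then
      -- data_centers.sort(reverse=True)
      let s := PySem.List.sorted l (fun x => x) true
      -- data_centers[-1]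
      match PySem.List.pyGet? s (-1) with
      | none => photos        -- IndexError on the empty list; excluded by Pre_
      | some last =>
        if last = 0 then
          -- data_centers.pop()
          match PySem.List.pop? s with
          | none => photos    -- unreachable: s is nonempty here
          | some (_, rest) => photosLoop fuel rest photos
        else
          -- data_centers[0] -= 1
          match PySem.List.pyGet? s 0 with
          | none => photos    -- unreachable: s is nonempty here
          | some first =>
            let s1 := pySetItem s 0 (first - 1)
            -- data_centers[-1] -= 1
            match PySem.List.pyGet? s1 (-1) with
            | none => photos  -- unreachable
            | some v1 => photosLoop fuel (pySetItem s1 (-1) (v1 - 1)) (photos + 1)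
    else photos

def photos_in_data_centers (data_centers : List Int) : Int :=
  photosLoop (pvMeasure data_centers + 1) data_centers 0

-- ===== PORT B =====
def photos_in_data_centers_alt (data_centers : List Int) : Int :=
  if data_centers.length = 1 then 0
  else
    let total := data_centers.sum
    match PySem.List.max? data_centers (fun x => x) with
    | none => 0   -- max([]) raises ValueError; excluded by Pre_
    | some m => min (PySem.Int.floordiv total 2) (total - m)

-- ===== PRECONDITION & SPEC =====
-- A raises IndexError on [] and loops forever when a negative value is present alongside at least
-- one other element (the minimum stays negative, is decremented forever, never popped); Pre_
-- excludes exactly those inputs (a singleton is fine: A returns 0 without entering the loop).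
def Pre_photos_in_data_centers (data_centers : List Int) : Prop :=
  data_centers ≠ [] ∧ (data_centers.length = 1 ∨ ∀ x ∈ data_centers, 0 ≤ x)
instance (data_centers : List Int) : Decidable (Pre_photos_in_data_centers data_centers) := by
  unfold Pre_photos_in_data_centers; infer_instance

def pvWitness_photos_in_data_centers : List Int := [2, 3, 1]

def Spec_photos_in_data_centers (data_centers : List Int) (out : Int) : Prop := out = photos_in_data_centers_alt data_centers
instance (data_centers : List Int) (out : Int) : Decidable (Spec_photos_in_data_centers data_centers out) := by unfold Spec_photos_in_data_centers; infer_instance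

-- ===== CLAIM (what is proved, stated in full; the proofs are below) =====
def Claim_equal_photos_in_data_centers : Prop := ∀ (data_centers : List Int), Dom_photos_in_data_centers data_centers → Pre_photos_in_data_centers data_centers → Spec_photos_in_data_centers data_centers (photos_in_data_centers data_centers)

-- ===== LEMMAS AND PROOFS =====

-- max?(l) with the identity key is the unique value that is a member and an upper bound
lemma max?_id_eq {l : List Int} {m : Int} (hm : m ∈ l) (hub : ∀ y ∈ l, y ≤ m) :
    PySem.List.max? l (fun x => x) = some m := by
  cases h : PySem.List.max? l (fun x => x) with
  | none =>
      rw [PySem.List.max?_eq_none_iff] at h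
      simp [h] at hm
  | some m' =>
      have h1 : m ≤ m' := PySem.List.max?_isMax h m hm
      have h2 : m' ≤ m := hub m' (PySem.List.max?_mem h)
      simp [le_antisymm h2 h1]

-- when l has an upper-bound member a, B's closed form reads min(sum//2, sum - a)
lemma alt_eq {l : List Int} {a : Int} (hne2 : l.length ≠ 1) (ha : a ∈ l)
    (hub : ∀ y ∈ l, y ≤ a) :
    photos_in_data_centers_alt l = min (PySem.Int.floordiv l.sum 2) (l.sum - a) := by
  simp [photos_in_data_centers_alt, hne2, max?_id_eq ha hub]

lemma pyGet?_zero_cons (a : Int) (t : List Int) :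
    PySem.List.pyGet? (a :: t) 0 = some a := by
  simp [PySem.List.pyGet?, PySem.List.pyIdx?]

lemma pyGet?_last_cons (a m : Int) (mid : List Int) :
    PySem.List.pyGet? (a :: (mid ++ [m])) (-1) = some m := by
  have h : PySem.List.pyGet? ((a :: mid) ++ [m]) (-1) = some m := by
    simp [PySem.List.pyGet?, PySem.List.pyIdx?]
  simpa using h

lemma pop?_last_cons (a m : Int) (mid : List Int) :
    PySem.List.pop? (a :: (mid ++ [m])) (-1) = some (m, a :: mid) := by
  simpa using PySem.List.pop?_last (a :: mid) m

lemma pySetItem_zero (a v : Int) (t : List Int) :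
    pySetItem (a :: t) 0 v = v :: t := by
  simp [pySetItem, PySem.List.pyIdx?]

lemma set_concat_length (l : List Int) (m v : Int) :
    (l ++ [m]).set l.length v = l ++ [v] := by
  induction l with
  | nil => rfl
  | cons x xs ih => simp [ih]

lemma pyIdx?_neg_one (n : Nat) (h : 1 ≤ n) :
    PySem.List.pyIdx? n (-1) = some (n - 1) := by
  simp only [PySem.List.pyIdx?]
  rw [if_neg (by omega), if_pos (by omega)]
  norm_num

lemma pySetItem_last_cons (a m v : Int) (mid : List Int) :
    pySetItem (a :: (mid ++ [m])) (-1) v = a :: (mid ++ [v]) := by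
  simp only [pySetItem]
  rw [show (a :: (mid ++ [m])).length = mid.length + 2 by simp]
  rw [pyIdx?_neg_one _ (by omega)]
  have h := set_concat_length (a :: mid) m v
  simp only [List.cons_append, List.length_cons] at h
  simp [h]

-- one unfolding step of the while-loop, with the let-bound sorted list written out
lemma photosLoop_succ (n : Nat) (l : List Int) (photos : Int) :
    photosLoop (n + 1) l photos =
      if l.length ≠ 1 then
        match PySem.List.pyGet? (PySem.List.sorted l (fun x => x) true) (-1) with
        | none => photos
        | some last =>
          if last = 0 then
            match PySem.List.pop? (PySem.List.sorted l (fun x => x) true) (-1) with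
            | none => photos
            | some (_, rest) => photosLoop n rest photos
          else
            match PySem.List.pyGet? (PySem.List.sorted l (fun x => x) true) 0 with
            | none => photos
            | some first =>
              match PySem.List.pyGet?
                  (pySetItem (PySem.List.sorted l (fun x => x) true) 0 (first - 1)) (-1) with
              | none => photos
              | some v1 =>
                photosLoop n
                  (pySetItem (pySetItem (PySem.List.sorted l (fun x => x) true) 0 (first - 1))
                    (-1) (v1 - 1)) (photos + 1)
      else photos := rfl

lemma loop_eq (fuel : Nat) : ∀ (l : List Int) (photos : Int), l ≠ [] →
    (∀ x ∈ l, 0 ≤ x) → pvMeasure l < fuel →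
    photosLoop fuel l photos = photos + photos_in_data_centers_alt l := by
  induction fuel with
  | zero => intro l photos _ _ h; omega
  | succ n IH =>
    intro l photos hne hnn hfuel
    by_cases hlen : l.length = 1
    · simp [photosLoop, hlen, photos_in_data_centers_alt]
    · have hlen2 : 2 ≤ l.length := by
        cases l with
        | nil => simp at hne
        | cons x t =>
          cases t with
          | nil => simp at hlen
          | cons y u => simp
      have hsp := PySem.List.sorted_perm l (fun x : Int => x) true
      have hpw := PySem.List.sorted_pairwise_rev l (fun x : Int => x)
      have hslen : (PySem.List.sorted l (fun x : Int => x) true).length = l.length :=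
        hsp.length_eq
      obtain ⟨a, mid, m, hs⟩ : ∃ a mid m,
          PySem.List.sorted l (fun x : Int => x) true = a :: (mid ++ [m]) := by
        cases hS : PySem.List.sorted l (fun x : Int => x) true with
        | nil => rw [hS] at hslen; simp at hslen; omega
        | cons a t =>
          have ht : t ≠ [] := by
            intro h
            rw [hS, h] at hslen
            simp at hslen
            omega
          exact ⟨a, t.dropLast, t.getLast ht,
            congrArg (a :: ·) (List.dropLast_append_getLast ht).symm⟩
      rw [hs] at hsp hpw
      have hlth : mid.length + 2 = l.length := by
        rw [← hslen, hs]; simp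
      -- a bounds everything in l; everything in mid lies between m and a
      have hmem : ∀ x, x ∈ a :: (mid ++ [m]) ↔ x ∈ l := fun x => hsp.mem_iff
      have hub : ∀ y ∈ l, y ≤ a := by
        intro y hy
        rcases List.mem_cons.mp ((hmem y).mpr hy) with rfl | h
        · exact le_refl y
        · rcases List.pairwise_cons.mp hpw with ⟨h1, _⟩
          exact h1 y h
      have hal : a ∈ l := (hmem a).mp (by simp)
      have hml : m ∈ l := (hmem m).mp (by simp)
      have hmub : ∀ x ∈ mid, x ≤ a :=
        fun x hx => hub x ((hmem x).mp (List.mem_cons_of_mem _ (List.mem_append_left _ hx)))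
      have hmidl : ∀ x ∈ mid, x ∈ l :=
        fun x hx => (hmem x).mp (List.mem_cons_of_mem _ (List.mem_append_left _ hx))
      have hsum : a + (mid.sum + m) = l.sum := by
        have := hsp.sum_eq
        simpa using this
      have hmsum : (mid.map Int.toNat).sum + (a.toNat + m.toNat) = (l.map Int.toNat).sum := by
        have := (hsp.map Int.toNat).sum_eq
        simp at this
        omega
      have ha0 : 0 ≤ a := hnn a hal
      have hm0' : 0 ≤ m := hnn m hml
      have hmid0 : ∀ x ∈ mid, 0 ≤ x := fun x hx => hnn x (hmidl x hx)
      have hmidsum0 : 0 ≤ mid.sum := List.sum_nonneg hmid0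
      rw [photosLoop_succ, if_pos hlen, hs]
      by_cases hm0 : m = 0
      · subst hm0
        simp only [pyGet?_last_cons, reduceIte, pop?_last_cons]
        have hmeas : pvMeasure (a :: mid) < n := by
          simp only [pvMeasure, List.map_cons, List.sum_cons, List.length_cons] at hfuel ⊢
          omega
        have hsub : ∀ x ∈ a :: mid, x ∈ l := by
          intro x hx
          rcases List.mem_cons.mp hx with rfl | h
          · exact hal
          · exact hmidl x h
        rw [IH (a :: mid) photos (by simp) (fun x hx => hnn x (hsub x hx)) hmeas]
        congr 1
        rcases eq_or_ne mid [] with hmid | hmid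
        · subst hmid
          rw [alt_eq hlen hal hub]
          rw [PySem.Int.floordiv_eq_ediv_of_pos (by norm_num)]
          simp only [photos_in_data_centers_alt, List.length_singleton, reduceIte]
          simp at hsum
          omega
        · have hlen' : (a :: mid).length ≠ 1 := by
            cases mid with
            | nil => exact absurd rfl hmid
            | cons b t => simp
          rw [alt_eq hlen hal hub,
              alt_eq hlen' (by simp) (fun y hy => hub y (hsub y hy))]
          have hseq : (a :: mid).sum = l.sum := by simp; omega
          rw [hseq]
      · simp only [pyGet?_last_cons, if_neg hm0, pyGet?_zero_cons, pySetItem_zero,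
          pySetItem_last_cons]
        have hm1 : 1 ≤ m := by omega
        have ham : m ≤ a := hub m hml
        have hmeas : pvMeasure ((a - 1) :: (mid ++ [m - 1])) < n := by
          simp only [pvMeasure, List.map_cons, List.map_append, List.sum_cons, List.sum_append,
            List.map_nil, List.sum_nil, List.length_cons, List.length_append,
            List.length_nil] at hfuel ⊢
          omega
        have hnn'' : ∀ x ∈ (a - 1) :: (mid ++ [m - 1]), 0 ≤ x := by
          intro x hx
          rcases List.mem_cons.mp hx with rfl | h
          · omega
          · rcases List.mem_append.mp h with h' | h'
            · exact hmid0 x h'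
            · have : x = m - 1 := List.mem_singleton.mp h'
              omega
        rw [IH ((a - 1) :: (mid ++ [m - 1])) (photos + 1) (by simp) hnn'' hmeas]
        have hlen'' : ((a - 1) :: (mid ++ [m - 1])).length ≠ 1 := by simp
        have hsum'' : ((a - 1) :: (mid ++ [m - 1])).sum = l.sum - 2 := by simp; omega
        rw [alt_eq hlen hal hub]
        by_cases hca : ∀ x ∈ mid, x ≤ a - 1
        · have hub'' : ∀ y ∈ (a - 1) :: (mid ++ [m - 1]), y ≤ a - 1 := by
            intro y hy
            rcases List.mem_cons.mp hy with rfl | h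
            · exact le_refl _
            · rcases List.mem_append.mp h with h' | h'
              · exact hca y h'
              · have : y = m - 1 := List.mem_singleton.mp h'
                omega
          rw [alt_eq hlen'' (by simp) hub'', hsum'']
          simp only [PySem.Int.floordiv_eq_ediv_of_pos (by norm_num : (0:Int) < 2)]
          omega
        · push Not at hca
          obtain ⟨x, hx, hxgt⟩ := hca
          have hax : a ∈ mid := by
            have hxa : x = a := le_antisymm (hmub x hx) (by omega)
            rwa [hxa] at hx
          have hub'' : ∀ y ∈ (a - 1) :: (mid ++ [m - 1]), y ≤ a := by
            intro y hy
            rcases List.mem_cons.mp hy with rfl | h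
            · omega
            · rcases List.mem_append.mp h with h' | h'
              · exact hmub y h'
              · have : y = m - 1 := List.mem_singleton.mp h'
                omega
          have hamem : a ∈ (a - 1) :: (mid ++ [m - 1]) :=
            List.mem_cons_of_mem _ (List.mem_append_left _ hax)
          have hasum : a ≤ mid.sum := List.single_le_sum hmid0 a hax
          rw [alt_eq hlen'' hamem hub'', hsum'']
          simp only [PySem.Int.floordiv_eq_ediv_of_pos (by norm_num : (0:Int) < 2)]
          omega

-- ===== VERDICT (by name: the statement is the Claim_ definition above) =====
theorem photos_in_data_centers_spec : Claim_equal_photos_in_data_centers := by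
  intro l _ hpre
  unfold Spec_photos_in_data_centers photos_in_data_centers
  rcases hpre with ⟨hne, hcase⟩
  rcases hcase with h1 | hnn
  · -- singleton: the loop is never entered, both sides are 0
    simp [photosLoop, photos_in_data_centers_alt, h1]
  · simpa using loop_eq _ l 0 hne hnn (Nat.lt_succ_self _)
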